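-- pv_equiv track=rewrite | github.com/ewgoedeke/fobe | eval/classify_tables.py | _classify_by_page
-- ===== SOURCE A (Python) =====
-- def _classify_by_page(table: dict, page_map: dict[int, str]) -> str | None:
--     """Look up a table's page number in the TOC-derived section map."""
--     page = table.get("pageNo")
--     if page is None:
--         return None
--
--     # Direct match
--     if page in page_map:
--         return page_map[page]
--
--     # Range match: find the section whose start page is closest but <= table page
--     sorted_pages = sorted(page_map.keys())
--     best_page = None
--     for p in sorted_pages:
--         if p <= page:
--             best_page = p
--         else:
--             break
--
--     if best_page is not None:
--         section = page_map[best_page]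
--         # If the section is NOTES, don't assign it directly — let keyword
--         # matching determine the specific DISC.* context
--         if section == "NOTES":
--             return None
--         # Cap range propagation: if the table is too far from the nearest
--         # TOC entry, don't assign (avoids over-classifying distant tables)
--         distance = page - best_page
--         # Find the next section's start page to determine safe range
--         sorted_pages = sorted(page_map.keys())
--         idx = sorted_pages.index(best_page)
--         if idx + 1 < len(sorted_pages):
--             max_distance = sorted_pages[idx + 1] - best_page
--         else:
--             max_distance = 20  # last section: cap at 20 pages
--         if distance > max_distance:
--             return None
--         return section
--
--     return None
-- ===== SOURCE B (Python) =====
-- def _classify_by_page(table: dict, page_map: dict[int, str]) -> str | None: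
--     """Look up a table's page number in the TOC-derived section map."""
--     page = table.get("pageNo")
--     if page is None:
--         return None
--
--     # Direct match (may return NOTES; no distance cap)
--     if page in page_map:
--         return page_map[page]
--
--     # Binary search on the sorted start pages: lo becomes the number of
--     # starts <= page (i.e. bisect_right), so keys[lo-1] is the nearest
--     # start at or below page and keys[lo] (if any) is the next section.
--     keys = sorted(page_map)
--     lo, hi = 0, len(keys)
--     while lo < hi:
--         mid = (lo + hi) // 2
--         if keys[mid] <= page:
--             lo = mid + 1
--         else:
--             hi = mid
--     if lo == 0:
--         return None
--     best = keys[lo - 1]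
--     section = page_map[best]
--     if section == "NOTES":
--         return None
--     nxt = keys[lo] if lo < len(keys) else best + 20
--     return section if page - best <= nxt - best else None
-- ===== Notes on version B (the rewrite author's own statement) =====
-- stated objective: alternative
-- what changed: A's linear best-so-far scan plus a redundant re-sort and a linear .index pass are replaced by one hand-written binary search (bisect_right) on the sorted keys, whose index directly yields both the nearest start page and the next section's start.
import Mathlib
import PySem

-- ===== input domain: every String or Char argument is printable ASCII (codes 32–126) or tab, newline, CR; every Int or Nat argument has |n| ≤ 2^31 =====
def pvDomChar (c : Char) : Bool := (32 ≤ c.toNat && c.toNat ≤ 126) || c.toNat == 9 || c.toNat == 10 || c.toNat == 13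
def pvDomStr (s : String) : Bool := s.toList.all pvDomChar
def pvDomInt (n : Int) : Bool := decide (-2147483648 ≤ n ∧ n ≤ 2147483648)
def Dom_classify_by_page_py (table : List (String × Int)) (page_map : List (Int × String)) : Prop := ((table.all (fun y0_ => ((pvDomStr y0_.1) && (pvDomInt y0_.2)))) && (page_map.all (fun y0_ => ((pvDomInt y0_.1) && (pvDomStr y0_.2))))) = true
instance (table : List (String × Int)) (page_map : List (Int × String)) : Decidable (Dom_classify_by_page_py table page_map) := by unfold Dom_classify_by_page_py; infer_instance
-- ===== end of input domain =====

-- One honest line: B replaces A's linear best-so-far scan, redundant re-sort and linear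
-- .index pass by a single hand-written binary search (bisect_right) on the sorted keys;
-- objective: alternative.

-- ===== PORT A =====
-- loop 'for p in sorted_pages: if p <= page: best_page = p else: break'
def pvLoopA (pages : List Int) (page : Int) (best : Option Int) : Option Int :=
  match pages with
  | [] => best
  | p :: rest => if p <= page then pvLoopA rest page (some p) else best

def classify_by_page_py (table : List (String × Int)) (page_map : List (Int × String)) : Option String :=
  let t := PySem.Dict.ofList table
  let pm := PySem.Dict.ofList page_map
  match t.get? "pageNo" with
  | none => none
  | some page =>
    if pm.contains page then pm.get? page
    else
      let sorted_pages := PySem.List.sorted pm.keys (fun x => x) false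
      match pvLoopA sorted_pages page none with
      | none => none
      | some best_page =>
        match pm.get? best_page with
        | none => none  -- unreachable: best_page is a key of pm
        | some sect =>
          if sect = "NOTES" then none
          else
            let distance := page - best_page
            let sorted_pages2 := PySem.List.sorted pm.keys (fun x => x) false
            match PySem.List.index? sorted_pages2 best_page with
            | none => none  -- unreachable: Python .index never raises here
            | some idx =>
              let max_distance :=
                if idx + 1 < sorted_pages2.length then
                  PySem.List.pyGetD sorted_pages2 ((idx : Int) + 1) 0 - best_page
                else (20 : Int)
              if distance > max_distance then none else some sect

-- ===== PORT B =====
-- 'while lo < hi: mid = (lo+hi)//2; if keys[mid] <= page: lo = mid+1 else: hi = mid'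
def pvBisect (keys : List Int) (page : Int) (lo hi : Nat) : Nat :=
  if lo < hi then
    if PySem.List.pyGetD keys (((lo + hi) / 2 : Nat) : Int) 0 ≤ page then
      pvBisect keys page ((lo + hi) / 2 + 1) hi
    else
      pvBisect keys page lo ((lo + hi) / 2)
  else lo
termination_by hi - lo
decreasing_by all_goals omega

def classify_by_page_py_alt (table : List (String × Int)) (page_map : List (Int × String)) : Option String :=
  let t := PySem.Dict.ofList table
  let pm := PySem.Dict.ofList page_map
  match t.get? "pageNo" with
  | none => none
  | some page =>
    if pm.contains page then pm.get? page
    else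
      let keys := PySem.List.sorted pm.keys (fun x => x) false
      let lo := pvBisect keys page 0 keys.length
      if lo = 0 then none
      else
        let best := PySem.List.pyGetD keys ((lo : Int) - 1) 0
        match pm.get? best with
        | none => none  -- unreachable: best is a key of pm
        | some sect =>
          if sect = "NOTES" then none
          else
            let nxt := if lo < keys.length then PySem.List.pyGetD keys ((lo : Int)) 0 else best + 20
            if page - best ≤ nxt - best then some sect else none

-- ===== PRECONDITION & SPEC =====
def Spec_classify_by_page_py (table : List (String × Int)) (page_map : List (Int × String)) (out : Option String) : Prop := out = classify_by_page_py_alt table page_map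
instance (table : List (String × Int)) (page_map : List (Int × String)) (out : Option String) : Decidable (Spec_classify_by_page_py table page_map out) := by unfold Spec_classify_by_page_py; infer_instance

-- ===== CLAIM (what is proved, stated in full; the proofs are below) =====
def Claim_equal_classify_by_page_py : Prop := ∀ (table : List (String × Int)) (page_map : List (Int × String)), Dom_classify_by_page_py table page_map → Spec_classify_by_page_py table page_map (classify_by_page_py table page_map)

-- ===== LEMMAS AND PROOFS =====

-- number of leading elements ≤ page
def pvT (S : List Int) (page : Int) : Nat := (S.takeWhile (fun x => decide (x ≤ page))).length

lemma pvLoopA_eq_getLast (page : Int) : ∀ (S : List Int) (acc : Option Int),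
    pvLoopA S page acc = ((S.takeWhile (fun x => decide (x ≤ page))).getLast?).or acc := by
  intro S
  induction S with
  | nil => intro acc; simp [pvLoopA]
  | cons p rest ih =>
    intro acc
    by_cases h : p ≤ page
    · have htw : List.takeWhile (fun x => decide (x ≤ page)) (p :: rest)
          = p :: rest.takeWhile (fun x => decide (x ≤ page)) :=
        List.takeWhile_cons_of_pos (by simpa using h)
      rw [show pvLoopA (p :: rest) page acc = pvLoopA rest page (some p) from by
        simp [pvLoopA, h], ih (some p), htw]
      cases hr : rest.takeWhile (fun x => decide (x ≤ page)) with
      | nil => simp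
      | cons a l =>
        obtain ⟨x, hx⟩ := Option.isSome_iff_exists.mp
          (List.getLast?_isSome.mpr (List.cons_ne_nil a l))
        simp [List.getLast?_cons_cons, hx]
    · have htw : List.takeWhile (fun x => decide (x ≤ page)) (p :: rest) = [] :=
        List.takeWhile_cons_of_neg (by simpa using h)
      rw [show pvLoopA (p :: rest) page acc = acc from by simp [pvLoopA, h], htw]
      simp

-- on a (weakly) sorted list, S[i] ≤ page iff i < pvT S page
lemma pvChar (S : List Int) (page : Int) (hpw : S.Pairwise (fun a b => a ≤ b))
    (i : Nat) (hi : i < S.length) : S[i] ≤ page ↔ i < pvT S page := by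
  have hlen : pvT S page ≤ S.length :=
    (List.takeWhile_prefix (fun x => decide (x ≤ page))).length_le
  have hsplit : S = S.takeWhile (fun x => decide (x ≤ page))
      ++ S.dropWhile (fun x => decide (x ≤ page)) :=
    (List.takeWhile_append_dropWhile).symm
  constructor
  · intro hle
    by_contra hnt
    have ht : pvT S page ≤ i := Nat.le_of_not_lt hnt
    have htlen : pvT S page < S.length := Nat.lt_of_le_of_lt ht hi
    have hdw : S.dropWhile (fun x => decide (x ≤ page)) ≠ [] := by
      intro hc
      have hl := congrArg List.length hsplit
      rw [hc] at hl
      simp only [List.append_nil] at hl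
      have : pvT S page = S.length := hl.symm
      omega
    have h1 : ∀ t : Nat, t = (List.takeWhile (fun x => decide (x ≤ page)) S).length →
        S[t]? = (S.dropWhile (fun x => decide (x ≤ page))).head? := by
      intro t htEq
      conv_lhs => rw [hsplit]
      rw [List.getElem?_append_right (by omega)]
      rw [show t - (List.takeWhile (fun x => decide (x ≤ page)) S).length = 0 by omega]
      rw [← List.head?_eq_getElem?]
    have h2 : S[pvT S page] = (S.dropWhile (fun x => decide (x ≤ page))).head hdw := by
      have := List.getElem?_eq_getElem htlen
      rw [h1 (pvT S page) rfl, List.head?_eq_some_head hdw] at this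
      exact (Option.some_injective _ this.symm)
    have hfail : ¬ (S[pvT S page] ≤ page) := by
      have := List.head_dropWhile_not (fun x => decide (x ≤ page)) hdw
      rw [h2]
      simpa using this
    have hmono : S[pvT S page] ≤ S[i] := by
      rcases Nat.eq_or_lt_of_le ht with h | h
      · simp [h]
      · exact (List.pairwise_iff_getElem.mp hpw) _ _ _ _ h
    exact hfail (le_trans hmono hle)
  · intro hlt
    have hpre := List.takeWhile_prefix (l := S) (fun x => decide (x ≤ page))
    have hi' : i < (S.takeWhile (fun x => decide (x ≤ page))).length := hlt
    have hmem : (S.takeWhile (fun x => decide (x ≤ page)))[i]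
        ∈ S.takeWhile (fun x => decide (x ≤ page)) := List.getElem_mem hi'
    have hp : (S.takeWhile (fun x => decide (x ≤ page)))[i] ≤ page := by
      simpa using List.mem_takeWhile_imp hmem
    exact (hpre.getElem hi') ▸ hp

-- the binary search computes pvT
lemma pvBisect_eq (S : List Int) (page : Int)
    (hchar : ∀ i (hi : i < S.length), S[i] ≤ page ↔ i < pvT S page) :
    ∀ (n lo hi : Nat), hi - lo ≤ n → lo ≤ pvT S page → pvT S page ≤ hi → hi ≤ S.length →
      pvBisect S page lo hi = pvT S page := by
  intro n
  induction n with
  | zero =>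
    intro lo hi h1 h2 h3 h4
    rw [pvBisect, if_neg (by omega)]
    omega
  | succ n ih =>
    intro lo hi h1 h2 h3 h4
    by_cases hlh : lo < hi
    · rw [pvBisect, if_pos hlh]
      have hmid : (lo + hi) / 2 < S.length := by omega
      rw [PySem.List.pyGetD_ofNat _ _ _ hmid]
      by_cases hle : S[(lo + hi) / 2] ≤ page
      · rw [if_pos hle]
        have := (hchar _ hmid).mp hle
        exact ih _ _ (by omega) (by omega) h3 h4
      · rw [if_neg hle]
        have : ¬ ((lo + hi) / 2 < pvT S page) := fun hc => hle ((hchar _ hmid).mpr hc)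
        exact ih _ _ (by omega) h2 (by omega) (by omega)
    · rw [pvBisect, if_neg hlh]; omega

-- first index of S[i] in a nodup list is i
lemma pvIndex_getElem (S : List Int) (hnd : S.Nodup) (i : Nat) (hi : i < S.length) :
    PySem.List.index? S S[i] = some i := by
  rw [PySem.List.index?_eq_some_iff]
  refine ⟨S.take i, S.drop (i + 1), ?_, by simp [Nat.min_eq_left (Nat.le_of_lt hi)], ?_⟩
  · conv_lhs => rw [← List.take_append_drop i S]
    rw [List.drop_eq_getElem_cons hi]
  · intro hmem
    obtain ⟨j, hj, hje⟩ := List.getElem_of_mem hmem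
    have hjlen : j < i := by simpa [Nat.min_eq_left (Nat.le_of_lt hi)] using hj
    rw [List.getElem_take] at hje
    exact absurd ((List.Nodup.getElem_inj_iff hnd).mp hje) (by omega)

-- the two tails agree on any weakly sorted, nodup key list
lemma pvTail_eq (pm : PySem.Dict Int String) (page : Int) (S : List Int)
    (hpw : S.Pairwise (fun a b => a ≤ b)) (hnd : S.Nodup) :
    (match pvLoopA S page none with
     | none => none
     | some best_page =>
       match pm.get? best_page with
       | none => none
       | some sect =>
         if sect = "NOTES" then none
         else
           let distance := page - best_page
           match PySem.List.index? S best_page with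
           | none => none
           | some idx =>
             let max_distance :=
               if idx + 1 < S.length then
                 PySem.List.pyGetD S ((idx : Int) + 1) 0 - best_page
               else (20 : Int)
             if distance > max_distance then none else some sect) =
    (let lo := pvBisect S page 0 S.length
     if lo = 0 then none
     else
       let best := PySem.List.pyGetD S ((lo : Int) - 1) 0
       match pm.get? best with
       | none => none
       | some sect =>
         if sect = "NOTES" then none
         else
           let nxt := if lo < S.length then PySem.List.pyGetD S ((lo : Int)) 0 else best + 20
           if page - best ≤ nxt - best then some sect else none) := by
  have hchar := pvChar S page hpw
  have hlen : pvT S page ≤ S.length :=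
    (List.takeWhile_prefix (fun x => decide (x ≤ page))).length_le
  have hb : pvBisect S page 0 S.length = pvT S page :=
    pvBisect_eq S page hchar S.length 0 S.length (by omega) (by omega) hlen le_rfl
  have hA : pvLoopA S page none = (S.takeWhile (fun x => decide (x ≤ page))).getLast? := by
    rw [pvLoopA_eq_getLast]
    cases (S.takeWhile (fun x => decide (x ≤ page))).getLast? <;> rfl
  cases htv : pvT S page with
  | zero =>
    have htw : S.takeWhile (fun x => decide (x ≤ page)) = [] :=
      List.length_eq_zero_iff.mp htv
    rw [hA, htw]
    dsimp only
    rw [hb, htv]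
    rfl
  | succ k =>
    have hklen : k < S.length := by omega
    have hgl : (S.takeWhile (fun x => decide (x ≤ page))).getLast? = some S[k] := by
      have hk' : k < (S.takeWhile (fun x => decide (x ≤ page))).length := by
        show k < pvT S page; omega
      rw [List.getLast?_eq_getElem?,
        show (S.takeWhile (fun x => decide (x ≤ page))).length - 1 = k from by
          show pvT S page - 1 = k; omega,
        List.getElem?_eq_getElem hk',
        (List.takeWhile_prefix (fun x => decide (x ≤ page))).getElem hk']
      rfl
    rw [hA, hgl]
    dsimp only
    rw [hb, htv]
    rw [if_neg (Nat.succ_ne_zero k)]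
    rw [show ((((k + 1 : Nat)) : Int) - 1) = ((k : Nat) : Int) from by push_cast; ring,
      PySem.List.pyGetD_ofNat S k 0 hklen]
    cases hpm : pm.get? S[k] with
    | none => rfl
    | some sect =>
      dsimp only
      by_cases hn : sect = "NOTES"
      · rw [if_pos hn, if_pos hn]
      · rw [if_neg hn, if_neg hn]
        rw [pvIndex_getElem S hnd k hklen]
        dsimp only
        by_cases hkl : k + 1 < S.length
        · rw [if_pos hkl, if_pos hkl]
          rw [show ((k : Nat) : Int) + 1 = (((k + 1 : Nat)) : Int) from by push_cast; ring,
            PySem.List.pyGetD_ofNat S (k + 1) 0 hkl]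
          by_cases hcond : page - S[k] ≤ S[k + 1] - S[k]
          · rw [if_neg (by omega), if_pos hcond]
          · rw [if_pos (by omega), if_neg hcond]
        · rw [if_neg hkl, if_neg hkl]
          by_cases hcond : page - S[k] ≤ S[k] + 20 - S[k]
          · rw [if_neg (by omega), if_pos hcond]
          · rw [if_pos (by omega), if_neg hcond]

-- ===== VERDICT (by name: the statement is the Claim_ definition above) =====
theorem classify_by_page_py_spec : Claim_equal_classify_by_page_py := by
  unfold Claim_equal_classify_by_page_py
  intro table page_map _
  unfold Spec_classify_by_page_py
  simp only [classify_by_page_py, classify_by_page_py_alt]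
  cases hpage : (PySem.Dict.ofList table).get? "pageNo" with
  | none => rfl
  | some page =>
    dsimp only
    by_cases hc : (PySem.Dict.ofList page_map).contains page = true
    · rw [if_pos hc, if_pos hc]
    · rw [if_neg hc, if_neg hc]
      have h1 : (PySem.List.sorted (PySem.Dict.ofList page_map).keys (fun x => x) false).Pairwise
          (fun a b => a ≤ b) := PySem.List.sorted_pairwise _ (fun x => x)
      have hnd : (PySem.List.sorted (PySem.Dict.ofList page_map).keys (fun x => x) false).Nodup :=
        (PySem.List.sorted_perm _ (fun x => x) false).symm.nodup
          (PySem.Dict.nodup_keys_ofList page_map)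
      exact pvTail_eq (PySem.Dict.ofList page_map) page _ h1 hnd
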